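-- pv_equiv track=rewrite | github.com/jonatelintelo/ConfigurableMasking | run_benchmarks_jailbreak.py | find_token_range_by_offsets
-- ===== SOURCE A (Python) =====
-- def find_token_range_by_offsets(prompt_text, question_text, offsets):
--     """Finds token start and end using character offset mappings."""
--     char_start = prompt_text.rfind(question_text.strip())
--     if char_start == -1:
--         return None, None
--
--     char_end = char_start + len(question_text.strip())
--     start_idx, end_idx = None, None
--
--     for i, (tok_start, tok_end) in enumerate(offsets):
--         if tok_start == tok_end:
--             continue
--         if start_idx is None and tok_end > char_start:
--             start_idx = i
--         if tok_start < char_end: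
--             end_idx = i
--
--     return start_idx, end_idx
-- ===== SOURCE B (Python) =====
-- def find_token_range_by_offsets(prompt_text, question_text, offsets):
--     """Finds token start and end using character offset mappings."""
--     q = question_text.strip()
--     char_start = prompt_text.rfind(q)
--     if char_start == -1:
--         return None, None
--     char_end = char_start + len(q)
--
--     start_idx = None
--     for i, (tok_start, tok_end) in enumerate(offsets):
--         if tok_start != tok_end and tok_end > char_start:
--             start_idx = i
--             break
--
--     end_idx = None
--     for i, (tok_start, tok_end) in reversed(list(enumerate(offsets))):
--         if tok_start != tok_end and tok_start < char_end:
--             end_idx = i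
--             break
--
--     return start_idx, end_idx
-- ===== Notes on version B (the rewrite author's own statement) =====
-- stated objective: alternative
-- what changed: A maintains both indices in one full pass over all tokens; B finds start_idx by a forward scan with early break and end_idx by a backward scan over the reversed enumeration with early break, so each scan stops at its first qualifying token.
import Mathlib
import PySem

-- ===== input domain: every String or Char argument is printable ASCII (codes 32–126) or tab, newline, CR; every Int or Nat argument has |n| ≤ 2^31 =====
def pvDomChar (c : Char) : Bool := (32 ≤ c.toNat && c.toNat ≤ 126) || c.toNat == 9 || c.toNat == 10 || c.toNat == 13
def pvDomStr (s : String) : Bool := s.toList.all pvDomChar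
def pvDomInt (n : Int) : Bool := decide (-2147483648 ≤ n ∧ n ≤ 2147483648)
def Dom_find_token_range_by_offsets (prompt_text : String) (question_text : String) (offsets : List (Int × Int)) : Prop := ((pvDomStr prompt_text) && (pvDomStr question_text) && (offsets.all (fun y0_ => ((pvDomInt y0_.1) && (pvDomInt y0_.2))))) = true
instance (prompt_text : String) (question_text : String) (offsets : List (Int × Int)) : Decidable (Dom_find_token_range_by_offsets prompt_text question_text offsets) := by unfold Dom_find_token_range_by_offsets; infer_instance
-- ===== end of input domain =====

-- B replaces A's single full pass maintaining both indices by two independent early-exit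
-- scans: a forward scan for start_idx and a backward scan over the reversed enumeration
-- for end_idx (objective: alternative decomposition, same cost).

-- ===== PORT A =====
-- the loop body of A's single for-loop (state = (start_idx, end_idx))
def pvStepA (cs ce : Int) (st : Option Int × Option Int) (x : Int × (Int × Int)) : Option Int × Option Int :=
  if x.2.1 = x.2.2 then st
  else
    (if st.1 = none ∧ cs < x.2.2 then some x.1 else st.1,
     if x.2.1 < ce then some x.1 else st.2)

def find_token_range_by_offsets (prompt_text : String) (question_text : String) (offsets : List (Int × Int)) : Option Int × Option Int :=
  let q := PySem.Str.strip question_text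
  let char_start := PySem.Str.rfind prompt_text q
  if char_start = -1 then (none, none)
  else
    let char_end := char_start + PySem.Str.len q
    (PySem.List.enumerate offsets).foldl (pvStepA char_start char_end) (none, none)

-- ===== PORT B =====
def find_token_range_by_offsets_alt (prompt_text : String) (question_text : String) (offsets : List (Int × Int)) : Option Int × Option Int :=
  let q := PySem.Str.strip question_text
  let char_start := PySem.Str.rfind prompt_text q
  if char_start = -1 then (none, none)
  else
    let char_end := char_start + PySem.Str.len q
    let E := PySem.List.enumerate offsets
    ((E.find? (fun x => decide (x.2.1 ≠ x.2.2 ∧ char_start < x.2.2))).map (·.1),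
     (E.reverse.find? (fun x => decide (x.2.1 ≠ x.2.2 ∧ x.2.1 < char_end))).map (·.1))

-- ===== PRECONDITION & SPEC =====
def Spec_find_token_range_by_offsets (prompt_text : String) (question_text : String) (offsets : List (Int × Int)) (out : Option Int × Option Int) : Prop := out = find_token_range_by_offsets_alt prompt_text question_text offsets
instance (prompt_text : String) (question_text : String) (offsets : List (Int × Int)) (out : Option Int × Option Int) : Decidable (Spec_find_token_range_by_offsets prompt_text question_text offsets out) := by unfold Spec_find_token_range_by_offsets; infer_instance

-- ===== CLAIM (what is proved, stated in full; the proofs are below) =====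
def Claim_equal_find_token_range_by_offsets : Prop := ∀ (prompt_text : String) (question_text : String) (offsets : List (Int × Int)), Dom_find_token_range_by_offsets prompt_text question_text offsets → Spec_find_token_range_by_offsets prompt_text question_text offsets (find_token_range_by_offsets prompt_text question_text offsets)

-- ===== LEMMAS AND PROOFS =====
theorem pvFold_eq (cs ce : Int) (L : List (Int × (Int × Int))) :
    ∀ (s0 e0 : Option Int),
      L.foldl (pvStepA cs ce) (s0, e0) =
        ((match s0 with
          | some a => some a
          | none => (L.find? (fun x => decide (x.2.1 ≠ x.2.2 ∧ cs < x.2.2))).map (·.1)),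
         (match L.reverse.find? (fun x => decide (x.2.1 ≠ x.2.2 ∧ x.2.1 < ce)) with
          | some y => some y.1
          | none => e0)) := by
  induction L with
  | nil => intro s0 e0; cases s0 <;> simp
  | cons x rest ih =>
    intro s0 e0
    simp only [List.foldl_cons, List.reverse_cons, List.find?_append, pvStepA]
    by_cases hz : x.2.1 = x.2.2
    · rw [if_pos hz, ih]
      cases hE : rest.reverse.find? (fun x => decide (x.2.1 ≠ x.2.2 ∧ x.2.1 < ce)) <;>
        cases s0 <;> simp [List.find?, hz]
    · rw [if_neg hz, ih]
      by_cases h1 : cs < x.2.2 <;> by_cases h2 : x.2.1 < ce <;>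
        cases hE : rest.reverse.find? (fun x => decide (x.2.1 ≠ x.2.2 ∧ x.2.1 < ce)) <;>
        cases s0 <;>
        simp [List.find?, hz, h1, h2]

theorem pvFold_none (cs ce : Int) (L : List (Int × (Int × Int))) :
    L.foldl (pvStepA cs ce) (none, none) =
      ((L.find? (fun x => decide (x.2.1 ≠ x.2.2 ∧ cs < x.2.2))).map (·.1),
       (L.reverse.find? (fun x => decide (x.2.1 ≠ x.2.2 ∧ x.2.1 < ce))).map (·.1)) := by
  rw [pvFold_eq]
  cases hE : L.reverse.find? (fun x => decide (x.2.1 ≠ x.2.2 ∧ x.2.1 < ce)) <;> simp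

-- ===== VERDICT =====
theorem find_token_range_by_offsets_spec : Claim_equal_find_token_range_by_offsets := by
  intro p q offs _
  unfold Spec_find_token_range_by_offsets find_token_range_by_offsets find_token_range_by_offsets_alt
  dsimp only
  rw [pvFold_none]
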